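-- pv_equiv track=rewrite | github.com/calico-team/calico-fa22 | toki/solutions/toki_general.py | solve
-- ===== SOURCE A (Python) =====
-- vowels = 'aeiou'
--
-- consonants = 'mnptkswjl'
--
-- illegal = ['wu', 'wo', 'ji', 'ti', 'nn', 'nm']
--
-- def solve(W: str) -> str:
--     answer = 'pona'
--
--     for y in range(len(W)):
--         x = W[y]
--
--         if W[y:y+2] in illegal:
--             answer = 'ike'
--             break
--
--         if x not in vowels and x not in consonants:
--             answer = 'ike'
--             break
--
--         if len(W[y:y+2]) == 2 and W[y] in vowels and W[y+1] in vowels: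
--             answer = 'ike'
--             break
--
--     p = 0
--     while p < len(W):
--         if is_valid_syllable(W[p:p+3]):
--             p += 3
--         elif is_valid_syllable(W[p:p+2]):
--             p += 2
--         elif is_valid_syllable(W[p:p+1]):
--             p += 1
--         else:
--             answer = 'ike'
--             break
--
--     return answer
--
-- def is_valid_syllable(s):
--     if len(s) == 1:
--         return s in vowels
--     elif len(s) == 2:
--         return s[0] in consonants and s[1] in vowels or s[0] in vowels and s[1] == 'n'
--     elif len(s) == 3:
--         return s[0] in consonants and s[1] in vowels and s[2] == 'n'
--     else:
--         return False
-- ===== SOURCE B (Python) =====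
-- vowels = set('aeiou')
--
-- consonants = set('mnptkswjl')
--
-- illegal_pairs = {('w', 'u'), ('w', 'o'), ('j', 'i'), ('t', 'i'), ('n', 'n'), ('n', 'm')}
--
-- def solve(W: str) -> str:
--     if any(c not in vowels and c not in consonants for c in W):
--         return 'ike'
--     if any((a, b) in illegal_pairs or (a in vowels and b in vowels) for a, b in zip(W, W[1:])):
--         return 'ike'
--     # one-pass DFA over syllables ([consonant]? vowel ['n']?)*
--     # state 0 = syllable boundary, 1 = just read a vowel, 2 = pending onset consonant
--     state = 0
--     for c in W:
--         if state == 2: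
--             if c in vowels:
--                 state = 1
--             else:
--                 return 'ike'
--         elif c in vowels:
--             state = 1
--         elif state == 1 and c == 'n':
--             state = 0
--         else:
--             state = 2
--     return 'pona' if state != 2 else 'ike'
-- ===== Notes on version B (the rewrite author's own statement) =====
-- stated objective: alternative
-- what changed: Replaces A's greedy 3/2/1 slice-based syllable parser and per-index slice checks by a single-pass three-state DFA over the syllable grammar plus linear alphabet/adjacent-pair checks with early return.
import Mathlib
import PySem

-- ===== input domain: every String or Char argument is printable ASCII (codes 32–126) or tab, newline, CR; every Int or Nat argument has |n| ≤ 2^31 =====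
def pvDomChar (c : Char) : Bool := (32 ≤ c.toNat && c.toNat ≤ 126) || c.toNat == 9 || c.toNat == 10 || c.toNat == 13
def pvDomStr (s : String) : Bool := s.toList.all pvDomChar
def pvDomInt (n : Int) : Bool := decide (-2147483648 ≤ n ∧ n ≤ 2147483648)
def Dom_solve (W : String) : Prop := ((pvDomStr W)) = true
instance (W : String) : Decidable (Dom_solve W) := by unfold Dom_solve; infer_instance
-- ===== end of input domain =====

-- B replaces A's greedy 3/2/1 slice parser by a one-pass three-state DFA over syllables
-- (objective: alternative algorithm of the same linear cost; return value only, no side effects).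

-- ===== PORT A =====
def vowelsA : List Char := ['a', 'e', 'i', 'o', 'u']
def consonantsA : List Char := ['m', 'n', 'p', 't', 'k', 's', 'w', 'j', 'l']
def illegalA : List (List Char) :=
  [['w','u'], ['w','o'], ['j','i'], ['t','i'], ['n','n'], ['n','m']]

def isValidSyllable (s : List Char) : Bool :=
  if s.length = 1 then vowelsA.contains s[0]!
  else if s.length = 2 then
    (consonantsA.contains s[0]! && vowelsA.contains s[1]!) ||
    (vowelsA.contains s[0]! && s[1]! == 'n')
  else if s.length = 3 then
    consonantsA.contains s[0]! && vowelsA.contains s[1]! && s[2]! == 'n'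
  else false

-- A's first for-loop over y, seen from suffix W[y:]
def loop1A : List Char → Bool
  | [] => false
  | c :: cs =>
    if illegalA.contains ((c :: cs).take 2) then true
    else if !(vowelsA.contains c) && !(consonantsA.contains c) then true
    else
      match cs with
      | [] => loop1A ([] : List Char)
      | b :: rest =>
        if vowelsA.contains c && vowelsA.contains b then true else loop1A (b :: rest)

-- A's while loop: greedy 3/2/1 consumption over the suffix W[p:]
def parseA : List Char → Bool
  | [] => true
  | c :: cs =>
    if isValidSyllable ((c :: cs).take 3) then parseA (cs.drop 2)
    else if isValidSyllable ((c :: cs).take 2) then parseA (cs.drop 1)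
    else if isValidSyllable ((c :: cs).take 1) then parseA cs
    else false
termination_by cs => cs.length
decreasing_by all_goals simp [List.length_drop]

def solve (W : String) : String :=
  let answer := if loop1A W.toList then "ike" else "pona"
  let answer := if parseA W.toList then answer else "ike"
  answer

-- ===== PORT B =====
def isV (c : Char) : Bool := c == 'a' || c == 'e' || c == 'i' || c == 'o' || c == 'u'
def isC (c : Char) : Bool :=
  c == 'm' || c == 'n' || c == 'p' || c == 't' || c == 'k' || c == 's' || c == 'w' || c == 'j' || c == 'l'
def badChar (c : Char) : Bool := !(isV c) && !(isC c)
def illegalPairs : List (Char × Char) :=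
  [('w','u'), ('w','o'), ('j','i'), ('t','i'), ('n','n'), ('n','m')]
def badPair (a b : Char) : Bool := illegalPairs.contains (a, b) || (isV a && isV b)

-- three-state DFA: 0 = syllable boundary, 1 = just after a vowel, 2 = pending onset consonant
def dfaB : Nat → List Char → Bool
  | st, [] => st != 2
  | st, c :: cs =>
    if st == 2 then (if isV c then dfaB 1 cs else false)
    else if isV c then dfaB 1 cs
    else if st == 1 && c == 'n' then dfaB 0 cs
    else dfaB 2 cs

def solve_alt (W : String) : String :=
  let cs := W.toList
  if cs.any badChar then "ike"
  else if (cs.zip cs.tail).any (fun p => badPair p.1 p.2) then "ike"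
  else if dfaB 0 cs then "pona" else "ike"

-- ===== PRECONDITION & SPEC =====
def Spec_solve (W : String) (out : String) : Prop := out = solve_alt W
instance (W : String) (out : String) : Decidable (Spec_solve W out) := by unfold Spec_solve; infer_instance

-- ===== CLAIM (what is proved, stated in full; the proofs are below) =====
def Claim_equal_solve : Prop := ∀ (W : String), Dom_solve W → Spec_solve W (solve W)

-- ===== LEMMAS AND PROOFS =====

-- proof-only helpers: what states 1 and 2 of the DFA mean for the greedy parser
def e1B : List Char → Bool
  | [] => true
  | c :: r => if c == 'n' then parseA r else parseA (c :: r)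

def e2B : List Char → Bool
  | [] => false
  | b :: rest => if isV b then e1B rest else false

theorem isV_eq (c : Char) : decide (c ∈ vowelsA) = isV c := by
  rw [Bool.eq_iff_iff]; simp [vowelsA, isV]; tauto

theorem isC_eq (c : Char) : decide (c ∈ consonantsA) = isC c := by
  rw [Bool.eq_iff_iff]; simp [consonantsA, isC]; tauto

theorem vowel_not_cons {c : Char} (h : isV c = true) : isC c = false := by
  simp [isV] at h
  obtain ((((rfl|rfl)|rfl)|rfl)|rfl) := h <;> decide

theorem vowel_ne_n {c : Char} (h : isV c = true) : (c == 'n') = false := by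
  simp [isV] at h
  obtain ((((rfl|rfl)|rfl)|rfl)|rfl) := h <;> decide

theorem illegal_one (c : Char) : decide ([c] ∈ illegalA) = false := by
  simp [illegalA]

theorem illegal_two (a b : Char) :
    decide ([a, b] ∈ illegalA) = decide ((a, b) ∈ illegalPairs) := by
  rw [Bool.eq_iff_iff]; simp [illegalA, illegalPairs, Prod.ext_iff]

theorem loop1_eq (cs : List Char) :
    loop1A cs = (cs.any badChar || (cs.zip cs.tail).any (fun p => badPair p.1 p.2)) := by
  induction cs with
  | nil => simp [loop1A]
  | cons c cs ih =>
    cases cs with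
    | nil =>
      simp [loop1A, illegal_one, badChar, isV_eq, isC_eq]
    | cons b rest =>
      rw [loop1A]
      simp only [List.take, List.any_cons, List.zip_cons_cons, List.tail_cons]
      rw [ih]
      simp only [badChar, badPair]
      simp only [List.contains_eq_mem, illegal_two, isV_eq, isC_eq]
      cases h1 : decide ((c, b) ∈ illegalPairs) <;> cases h2 : isV c <;>
        cases h3 : isC c <;> cases h4 : isV b <;> simp [badChar, h1, h2, h3, h4]

theorem parse_vowel {v : Char} (hv : isV v = true) (cs : List Char) :
    parseA (v :: cs) = e1B cs := by
  have hnc := vowel_not_cons hv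
  cases cs with
  | nil =>
    rw [parseA]
    simp [isValidSyllable, isV_eq, hv, e1B, parseA]
  | cons b rest =>
    cases rest with
    | nil =>
      rw [parseA]
      by_cases hb : b = 'n'
      · subst hb
        simp [isValidSyllable, isV_eq, isC_eq, hv, hnc, e1B, parseA]
      · simp [isValidSyllable, isV_eq, isC_eq, hv, hnc, e1B, hb, parseA]
    | cons d r =>
      rw [parseA]
      by_cases hb : b = 'n'
      · subst hb
        simp [isValidSyllable, isV_eq, isC_eq, hv, hnc, e1B]
      · simp [isValidSyllable, isV_eq, isC_eq, hv, hnc, e1B, hb]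

theorem parse_cons {k : Char} (hk : isC k = true) (hkv : isV k = false) (cs : List Char) :
    parseA (k :: cs) = e2B cs := by
  cases cs with
  | nil =>
    rw [parseA]
    simp [isValidSyllable, isV_eq, isC_eq, hk, hkv, e2B]
  | cons b rest =>
    cases rest with
    | nil =>
      rw [parseA]
      by_cases hb : isV b
      · simp [isValidSyllable, isV_eq, isC_eq, hk, hkv, hb, e2B, e1B, parseA,
          vowel_ne_n hb]
      · simp only [Bool.not_eq_true] at hb
        simp [isValidSyllable, isV_eq, isC_eq, hk, hkv, hb, e2B, parseA]
    | cons d r =>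
      rw [parseA]
      by_cases hb : isV b
      · by_cases hd : d = 'n'
        · subst hd
          simp [isValidSyllable, isV_eq, isC_eq, hk, hkv, hb, e2B, e1B]
        · simp [isValidSyllable, isV_eq, isC_eq, hk, hkv, hb, hd, e2B, e1B]
      · simp only [Bool.not_eq_true] at hb
        simp [isValidSyllable, isV_eq, isC_eq, hk, hkv, hb, e2B]

theorem dfa_eq (cs : List Char) (h : ∀ c ∈ cs, isV c || isC c) :
    dfaB 0 cs = parseA cs ∧ dfaB 1 cs = e1B cs ∧ dfaB 2 cs = e2B cs := by
  induction cs with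
  | nil => simp [dfaB, parseA, e1B, e2B]
  | cons c cs ih =>
    have hc : isV c || isC c := h c (by simp)
    have ih' := ih (fun x hx => h x (by simp [hx]))
    obtain ⟨ih0, ih1, ih2⟩ := ih'
    by_cases hv : isV c = true
    · have hne := vowel_ne_n hv
      refine ⟨?_, ?_, ?_⟩
      · rw [dfaB]; simp [hv, ih1, parse_vowel hv]
      · rw [dfaB]; simp [hv, hne, ih1, e1B, parse_vowel hv]
      · rw [dfaB]; simp [hv, ih1, e2B, e1B]
    · simp only [Bool.not_eq_true] at hv
      have hcc : isC c = true := by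
        cases h1 : isV c <;> cases h2 : isC c <;> simp_all
      refine ⟨?_, ?_, ?_⟩
      · rw [dfaB]; simp [hv, ih2, parse_cons hcc hv]
      · rw [dfaB]
        by_cases hn : c = 'n'
        · subst hn
          simp [hv, ih0, e1B]
        · simp [hv, hn, ih2, e1B, parse_cons hcc hv]
      · rw [dfaB]; simp [hv, e2B]

-- ===== VERDICT (by name: the statement is the Claim_ definition above) =====
theorem solve_spec : Claim_equal_solve := by
  intro W _
  unfold Spec_solve solve solve_alt
  simp only []
  rw [loop1_eq]
  cases hbc : (W.toList.any badChar) with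
  | true => simp [hbc]
  | false =>
    cases hbp : ((W.toList.zip W.toList.tail).any (fun p => badPair p.1 p.2)) with
    | true => simp [hbc, hbp]
    | false =>
      have halpha : ∀ c ∈ W.toList, isV c || isC c := by
        intro c hcmem
        have := List.any_eq_false.mp hbc c hcmem
        simp [badChar] at this
        cases h1 : isV c <;> cases h2 : isC c <;> simp_all
      have := (dfa_eq W.toList halpha).1
      rw [this]
      cases hp : parseA W.toList <;> simp [hbc, hbp, hp]
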